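-- pv_equiv track=rewrite | github.com/hd1534/google-foobar | level2/Power Hungry/solution.py | solution
-- ===== SOURCE A (Python) =====
-- def solution(xs):
--     # Your code here
--     if len(xs) == 1:
--         return str(xs[0])
--
--     pos = [x for x in xs if x > 0]
--     neg = [x for x in xs if x < 0]
--
--     pos_cnt = len(pos)
--     neg_cnt = len(neg)
--
--     if (neg_cnt == 1 and pos_cnt == 0) or (neg_cnt == 0 and pos_cnt == 0):
--         return '0'
--
--     if neg_cnt % 2:
--         neg.remove(max(neg))
--
--     result = 1
--     for n in pos:
--         result *= n
--
--     for n in neg: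
--         result *= n
--
--     return str(result)
-- ===== SOURCE B (Python) =====
-- def solution(xs):
--     if len(xs) == 1:
--         return str(xs[0])
--     prod = 1
--     nz_cnt = 0
--     neg_cnt = 0
--     max_neg = None
--     for x in xs:
--         if x != 0:
--             prod *= x
--             nz_cnt += 1
--             if x < 0:
--                 neg_cnt += 1
--                 if max_neg is None or x > max_neg:
--                     max_neg = x
--     if nz_cnt == neg_cnt and neg_cnt <= 1:
--         return '0'
--     if neg_cnt % 2:
--         prod //= max_neg
--     return str(prod)
-- ===== Notes on version B (the rewrite author's own statement) =====
-- stated objective: alternative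
-- what changed: B replaces A's two filter passes, list mutation (neg.remove(max(neg))) and two product loops by a single fold over xs maintaining (running product of nonzeros, nonzero count, negative count, max negative), reconstructing the '0' guard from the counts and dividing out the closest-to-zero negative with exact integer division.
import Mathlib
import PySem

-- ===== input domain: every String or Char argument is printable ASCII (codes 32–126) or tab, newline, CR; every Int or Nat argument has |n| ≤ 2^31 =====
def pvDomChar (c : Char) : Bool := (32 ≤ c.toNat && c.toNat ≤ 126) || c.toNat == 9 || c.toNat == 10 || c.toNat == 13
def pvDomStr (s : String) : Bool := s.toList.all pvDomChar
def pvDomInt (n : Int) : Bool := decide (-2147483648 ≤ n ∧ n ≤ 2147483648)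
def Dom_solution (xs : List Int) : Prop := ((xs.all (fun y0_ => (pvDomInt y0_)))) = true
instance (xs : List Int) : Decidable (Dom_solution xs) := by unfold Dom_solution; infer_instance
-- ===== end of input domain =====

-- B fuses A's filter passes, list mutation (neg.remove) and product loops into one
-- fold over xs with constant extra state; same asymptotic cost, different structure.

-- ===== PORT A =====
def solution (xs : List Int) : String :=
  if xs.length = 1 then
    PySem.Int.toStr ((PySem.List.pyGet? xs 0).getD 0)  -- xs[0]; guarded by len = 1, never none
  else
    let pos := xs.filter (fun x => decide (0 < x))
    let neg := xs.filter (fun x => decide (x < 0))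
    let pos_cnt := pos.length
    let neg_cnt := neg.length
    if (neg_cnt = 1 ∧ pos_cnt = 0) ∨ (neg_cnt = 0 ∧ pos_cnt = 0) then "0"
    else
      -- neg.remove(max(neg)) when neg_cnt is odd; max/remove guarded: neg ≠ [] there
      let neg2 := if neg_cnt % 2 = 1 then
          ((PySem.List.max? neg (fun y => y)).bind
            (fun m => PySem.List.remove? neg m)).getD neg
        else neg
      let result := pos.foldl (fun r n => r * n) 1
      let result := neg2.foldl (fun r n => r * n) result
      PySem.Int.toStr result

-- ===== PORT B =====
-- one step of B's single pass: state = (prod of nonzeros, nonzero count, negative count, max negative)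
def bStep (s : Int × Int × Int × Option Int) (x : Int) : Int × Int × Int × Option Int :=
  if x ≠ 0 then
    let prod := s.1 * x
    let nz := s.2.1 + 1
    if x < 0 then
      let ng := s.2.2.1 + 1
      let mx := match s.2.2.2 with
        | none => some x
        | some m => if m < x then some x else some m
      (prod, nz, ng, mx)
    else (prod, nz, s.2.2.1, s.2.2.2)
  else s

def solution_alt (xs : List Int) : String :=
  if xs.length = 1 then
    PySem.Int.toStr ((PySem.List.pyGet? xs 0).getD 0)  -- xs[0]; guarded by len = 1, never none
  else
    let st := xs.foldl bStep (1, 0, 0, none)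
    if st.2.1 = st.2.2.1 ∧ st.2.2.1 ≤ 1 then "0"
    else if PySem.Int.mod st.2.2.1 2 = 1 then
      -- prod //= max_neg; guarded: neg count odd ⇒ max_neg present, getD never used
      PySem.Int.toStr (PySem.Int.floordiv st.1 (st.2.2.2.getD 1))
    else
      PySem.Int.toStr st.1

-- ===== PRECONDITION & SPEC =====
def Spec_solution (xs : List Int) (out : String) : Prop := out = solution_alt xs
instance (xs : List Int) (out : String) : Decidable (Spec_solution xs out) := by unfold Spec_solution; infer_instance

-- ===== CLAIM (what is proved, stated in full; the proofs are below) =====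
def Claim_equal_solution : Prop := ∀ (xs : List Int), Dom_solution xs → Spec_solution xs (solution xs)

-- ===== LEMMAS AND PROOFS =====

-- proof-only abbreviations for A's two filtered lists
def posL (xs : List Int) : List Int := xs.filter (fun x => decide (0 < x))
def negL (xs : List Int) : List Int := xs.filter (fun x => decide (x < 0))

-- the max-tracking component of B's fold, as a standalone fold over the negatives
def mfold (mo : Option Int) (l : List Int) : Option Int :=
  l.foldl (fun o x => match o with
    | none => some x
    | some m => if m < x then some x else some m) mo

lemma mfold_some (l : List Int) (x : Int) :
    mfold (some x) l = some (l.foldl max x) := by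
  induction l generalizing x with
  | nil => rfl
  | cons y t ih =>
      simp only [mfold, List.foldl_cons] at *
      have hstep : (if x < y then some y else some x) = some (max x y) := by
        rw [max_def_lt]; exact (apply_ite some _ _ _).symm
      rw [hstep]
      exact ih (max x y)

lemma foldl_mul_eq (l : List Int) (r : Int) :
    l.foldl (fun a b => a * b) r = r * l.prod := by
  induction l generalizing r with
  | nil => simp
  | cons x t ih => simp [List.foldl_cons, ih, mul_assoc]

-- characterisation of B's fold in terms of A's filtered lists
lemma bStep_fold (xs : List Int) (p nz ng : Int) (mo : Option Int) :
    xs.foldl bStep (p, nz, ng, mo) =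
      (p * ((posL xs).prod * (negL xs).prod),
       nz + (posL xs).length + (negL xs).length,
       ng + (negL xs).length,
       mfold mo (negL xs)) := by
  induction xs generalizing p nz ng mo with
  | nil => simp [posL, negL, mfold]
  | cons x t ih =>
      rcases lt_trichotomy x 0 with hx | hx | hx
      · have hpos : posL (x :: t) = posL t := by
          simp [posL, not_lt.mpr hx.le]
        have hneg : negL (x :: t) = x :: negL t := by
          simp [negL, hx]
        simp only [List.foldl_cons, bStep, if_pos hx.ne, if_pos hx]
        rw [ih, hpos, hneg]
        simp only [List.prod_cons, List.length_cons, mfold, List.foldl_cons]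
        refine Prod.ext (by ring) (Prod.ext (by push_cast; ring) (Prod.ext (by push_cast; ring) rfl))
      · subst hx
        have hpos : posL ((0:Int) :: t) = posL t := by simp [posL]
        have hneg : negL ((0:Int) :: t) = negL t := by simp [negL]
        simp only [List.foldl_cons, bStep, ne_eq, not_true_eq_false, if_false]
        rw [ih, hpos, hneg]
      · have hpos : posL (x :: t) = x :: posL t := by
          simp [posL, hx]
        have hneg : negL (x :: t) = negL t := by
          simp [negL, not_lt.mpr hx.le]
        simp only [List.foldl_cons, bStep, if_pos hx.ne', if_neg (not_lt.mpr hx.le)]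
        rw [ih, hpos, hneg]
        simp only [List.prod_cons, List.length_cons]
        refine Prod.ext (by ring) (Prod.ext (by push_cast; ring) rfl)

-- ===== VERDICT (by name: the statement is the Claim_ definition above) =====
theorem solution_spec : Claim_equal_solution := by
  unfold Claim_equal_solution
  intro xs _
  unfold Spec_solution solution solution_alt
  by_cases h1 : xs.length = 1
  · simp [h1]
  · simp only [if_neg h1]
    rw [bStep_fold]
    simp only [posL, negL]
    set pos := xs.filter (fun x => decide (0 < x)) with hposdef
    set neg := xs.filter (fun x => decide (x < 0)) with hnegdef
    by_cases hz : (neg.length = 1 ∧ pos.length = 0) ∨ (neg.length = 0 ∧ pos.length = 0)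
    · -- both "0" guards fire
      have hbz : ((0:Int) + (pos.length:Int) + (neg.length:Int) = 0 + (neg.length:Int)
          ∧ (0:Int) + (neg.length:Int) ≤ 1) := by omega
      rw [if_pos hz, if_pos hbz]
    · have hbz : ¬ ((0:Int) + (pos.length:Int) + (neg.length:Int) = 0 + (neg.length:Int)
          ∧ (0:Int) + (neg.length:Int) ≤ 1) := by omega
      rw [if_neg hz, if_neg hbz]
      have hmod : PySem.Int.mod ((0:Int) + (neg.length:Int)) 2 = ((neg.length % 2 : Nat) : Int) := by
        rw [PySem.Int.mod_eq_emod_of_pos (by norm_num)]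
        omega
      by_cases hodd : neg.length % 2 = 1
      · -- odd number of negatives: divide out the maximum negative
        have hne : neg ≠ [] := by intro h; rw [h] at hodd; simp at hodd
        obtain ⟨x, t, hxt⟩ := List.exists_cons_of_ne_nil hne
        have hmax : PySem.List.max? neg (fun y => y) = some (t.foldl max x) := by
          rw [hxt]; exact PySem.List.max?_id_cons x t
        set m := t.foldl max x with hmdef
        have hmmem : m ∈ neg := PySem.List.max?_mem hmax
        have hm0 : m < 0 := by
          have := hmmem; rw [hnegdef] at this
          simpa using (List.mem_filter.mp this).2
        have hrem : PySem.List.remove? neg m = some (neg.erase m) :=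
          PySem.List.remove?_eq_some_erase neg m hmmem
        have hmf : mfold none neg = some m := by
          rw [hxt]; simpa [mfold, List.foldl_cons] using mfold_some t x
        have hbodd : PySem.Int.mod ((0:Int) + (neg.length:Int)) 2 = 1 := by
          rw [hmod, hodd]; rfl
        rw [if_pos hodd, if_pos hbodd, hmax, hmf]
        simp only [Option.bind_some, hrem, Option.getD_some]
        congr 1
        rw [foldl_mul_eq, foldl_mul_eq, one_mul]
        have hprodsplit : neg.prod = m * (neg.erase m).prod := (List.prod_erase hmmem).symm
        have hms : (1:Int) * (pos.prod * neg.prod) = (pos.prod * (neg.erase m).prod) * m := by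
          rw [hprodsplit]; ring
        rw [hms]
        unfold PySem.Int.floordiv
        exact (Int.mul_fdiv_cancel _ hm0.ne).symm
      · -- even number of negatives: the product itself
        have hbodd : ¬ PySem.Int.mod ((0:Int) + (neg.length:Int)) 2 = 1 := by
          rw [hmod]; omega
        rw [if_neg hodd, if_neg hbodd]
        congr 1
        rw [foldl_mul_eq, foldl_mul_eq, one_mul, one_mul]
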